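-- pv_equiv track=rewrite | github.com/moiz67932/moiz-dental-ai-agent | utils/phone_utils.py | parse_spoken_numerals
-- ===== SOURCE A (Python) =====
-- from typing import Optional, Tuple, TYPE_CHECKING
--
-- def parse_spoken_numerals(text: Optional[str]) -> str:
--     """
--     Parse spoken phone numbers, handling 'double', 'triple' and word-to-digit conversion.
--
--     Examples:
--         "double two" -> "22"
--         "triple three" -> "333"
--         "zero three zero zero" -> "0300"
--         "plus nine two" -> "+92"
--     """
--     if not text:
--         return ""
--
--     s = text.lower().strip()
--
--     # word to digit map
--     w2d = {
--         "zero": "0", "oh": "0", "one": "1", "two": "2", "three": "3", "four": "4",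
--         "five": "5", "six": "6", "seven": "7", "eight": "8", "nine": "9"
--     }
--
--     # Handle "plus"
--     s = s.replace("plus", "+")
--
--     words = s.split()
--     result = []
--     i = 0
--     while i < len(words):
--         w = words[i]
--
--         # Handle double/triple
--         multiplier = 1
--         if w in ("double", "triple"):
--             multiplier = 2 if w == "double" else 3
--             if i + 1 < len(words):
--                 next_w = words[i+1]
--                 # If next word is a digit word like "two"
--                 if next_w in w2d:
--                     digit = w2d[next_w]
--                     result.append(digit * multiplier)
--                     i += 2
--                     continue
--                 # If next word is a digit string like "2"
--                 elif next_w.isdigit():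
--                     result.append(next_w * multiplier)
--                     i += 2
--                     continue
--             # If "double" is at end or not followed by digit, ignore it or treat as noise?
--             # For safety, just skip it if we can't consume next token
--             i += 1
--             continue
--
--         # Handle digit words
--         if w in w2d:
--             result.append(w2d[w])
--         # Handle existing digits/symbols
--         else:
--             # clean non-digit chars except +
--             cleaned = "".join(c for c in w if c.isdigit() or c == "+")
--             if cleaned:
--                 result.append(cleaned)
--
--         i += 1
--
--     return "".join(result)
-- ===== SOURCE B (Python) =====
-- def parse_spoken_numerals(text):
--     """Single for-loop over words carrying a pending-multiplier state."""
--     if not text: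
--         return ""
--     w2d = {
--         "zero": "0", "oh": "0", "one": "1", "two": "2", "three": "3", "four": "4",
--         "five": "5", "six": "6", "seven": "7", "eight": "8", "nine": "9",
--     }
--     out = []
--     mult = 1
--     for w in text.lower().strip().replace("plus", "+").split():
--         if w in ("double", "triple"):
--             mult = 2 if w == "double" else 3
--             continue
--         if w in w2d:
--             out.append(w2d[w] * mult)
--         elif w.isdigit():
--             out.append(w * mult)
--         else:
--             cleaned = "".join(c for c in w if c.isdigit() or c == "+")
--             if cleaned:
--                 out.append(cleaned)
--         mult = 1
--     return "".join(out)
-- ===== Notes on version B (the rewrite author's own statement) =====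
-- stated objective: simpler
-- what changed: Replaces A's index-jumping while loop (lookahead consuming two tokens for 'double'/'triple') with a single for-loop over the words that carries a pending-multiplier state applied to the next digit-like token.
import Mathlib
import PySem

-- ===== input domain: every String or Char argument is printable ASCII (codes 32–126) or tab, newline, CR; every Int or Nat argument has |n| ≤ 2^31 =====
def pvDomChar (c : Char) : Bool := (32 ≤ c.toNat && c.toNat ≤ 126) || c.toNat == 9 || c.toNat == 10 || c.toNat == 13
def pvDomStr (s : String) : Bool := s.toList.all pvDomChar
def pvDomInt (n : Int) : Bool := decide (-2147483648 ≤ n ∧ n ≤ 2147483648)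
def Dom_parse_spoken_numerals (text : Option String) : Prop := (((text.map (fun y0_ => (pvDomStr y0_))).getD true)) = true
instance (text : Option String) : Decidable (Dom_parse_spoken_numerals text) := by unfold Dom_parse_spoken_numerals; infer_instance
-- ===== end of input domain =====

-- B replaces A's index-jumping while loop by a single pass carrying a pending-multiplier state (objective: simpler; same cost).

-- shared context: the word-to-digit dict, Python's s * n on strings, and the per-word cleaning (both Pythons contain these verbatim)
def pvW2d : PySem.Dict String String := PySem.Dict.ofList
  [("zero", "0"), ("oh", "0"), ("one", "1"), ("two", "2"), ("three", "3"), ("four", "4"),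
   ("five", "5"), ("six", "6"), ("seven", "7"), ("eight", "8"), ("nine", "9")]

-- Python `s * n` for n ≥ 0 (exact: concatenation of n copies)
def pvStrMul (s : String) (n : Nat) : String := PySem.Str.join "" (List.replicate n s)

-- `"".join(c for c in w if c.isdigit() or c == "+")`
def pvClean (w : String) : String := String.ofList (w.toList.filter (fun c => PySem.Chars.isdigit c || c == '+'))

-- ===== PORT A =====
-- A's while loop with i += 1 / i += 2 jumps, as structural recursion on the word list
def pvALoop (words : List String) : List String :=
  match words with
  | [] => []
  | w :: rest =>
    if w = "double" ∨ w = "triple" then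
      let multiplier : Nat := if w = "double" then 2 else 3
      match rest with
      | next_w :: rest2 =>
        match PySem.Dict.get? pvW2d next_w with
        | some digit => pvStrMul digit multiplier :: pvALoop rest2
        | none =>
          if PySem.Str.strIsdigit next_w then pvStrMul next_w multiplier :: pvALoop rest2
          else pvALoop (next_w :: rest2)
      | [] => pvALoop ([] : List String)
    else
      match PySem.Dict.get? pvW2d w with
      | some d => d :: pvALoop rest
      | none =>
        let cleaned := pvClean w
        if cleaned ≠ "" then cleaned :: pvALoop rest else pvALoop rest

def parse_spoken_numerals (text : Option String) : String :=
  match text with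
  | none => ""
  | some t =>
    if t = "" then ""
    else
      let s := PySem.Str.strip (PySem.Str.lower t)
      let s := PySem.Str.replace s "plus" "+"
      PySem.Str.join "" (pvALoop (PySem.Str.split₀ s))

-- ===== PORT B =====
-- B's single for-loop, carrying the pending multiplier `mult` through the pass
def pvBLoop (words : List String) (mult : Nat) : List String :=
  match words with
  | [] => []
  | w :: rest =>
    if w = "double" then pvBLoop rest 2
    else if w = "triple" then pvBLoop rest 3
    else
      match PySem.Dict.get? pvW2d w with
      | some d => pvStrMul d mult :: pvBLoop rest 1
      | none =>
        if PySem.Str.strIsdigit w then pvStrMul w mult :: pvBLoop rest 1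
        else
          let cleaned := pvClean w
          if cleaned ≠ "" then cleaned :: pvBLoop rest 1 else pvBLoop rest 1

def parse_spoken_numerals_alt (text : Option String) : String :=
  match text with
  | none => ""
  | some t =>
    if t = "" then ""
    else
      let s := PySem.Str.replace (PySem.Str.strip (PySem.Str.lower t)) "plus" "+"
      PySem.Str.join "" (pvBLoop (PySem.Str.split₀ s) 1)

-- ===== PRECONDITION & SPEC =====
def Spec_parse_spoken_numerals (text : Option String) (out : String) : Prop := out = parse_spoken_numerals_alt text
instance (text : Option String) (out : String) : Decidable (Spec_parse_spoken_numerals text out) := by unfold Spec_parse_spoken_numerals; infer_instance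

-- ===== CLAIM (what is proved, stated in full; the proofs are below) =====
def Claim_equal_parse_spoken_numerals : Prop := ∀ (text : Option String), Dom_parse_spoken_numerals text → Spec_parse_spoken_numerals text (parse_spoken_numerals text)

-- ===== LEMMAS AND PROOFS =====

-- the output of pvBLoop at a non-digit-like head does not depend on the pending multiplier
theorem pvBLoop_mult_indep (w : String) (rest : List String) (m m' : Nat)
    (h1 : PySem.Dict.get? pvW2d w = none) (h2 : PySem.Str.strIsdigit w = false) :
    pvBLoop (w :: rest) m = pvBLoop (w :: rest) m' := by
  unfold pvBLoop
  split_ifs <;> simp_all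

theorem pvStrMul_one (s : String) : pvStrMul s 1 = s := by
  simp [pvStrMul, PySem.Str.join]

theorem pvClean_of_isdigit (w : String) (h : PySem.Str.strIsdigit w = true) :
    pvClean w = w ∧ w ≠ "" := by
  simp [PySem.Str.strIsdigit_eq, PySem.Chars.strIsdigit] at h
  refine ⟨?_, h.1⟩
  unfold pvClean
  rw [List.filter_eq_self.mpr (fun c hc => by simp [h.2 c hc])]
  simp

theorem pvALoop_mult_skip (w next_w : String) (rest2 : List String)
    (hm : w = "double" ∨ w = "triple")
    (hget : PySem.Dict.get? pvW2d next_w = none)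
    (hdig : PySem.Chars.strIsdigit next_w.toList = false) :
    pvALoop (w :: next_w :: rest2) = pvALoop (next_w :: rest2) := by
  rcases hm with h | h <;> subst h <;>
    (conv_lhs => rw [pvALoop]) <;> simp [hget, hdig]

theorem pvLoop_eq : ∀ (ws : List String), pvALoop ws = pvBLoop ws 1 := by
  intro ws
  induction ws using pvALoop.induct with
  | case1 => rfl
  | case2 w hmult next_w rest2 digit hget ih =>
    -- multiplier word followed by a digit word
    have hnd : next_w ≠ "double" := by
      rintro rfl
      rw [show pvW2d.get? "double" = none from by decide] at hget; simp at hget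
    have hnt : next_w ≠ "triple" := by
      rintro rfl
      rw [show pvW2d.get? "triple" = none from by decide] at hget; simp at hget
    rcases hmult with h | h <;> subst h <;>
      simp_all [pvALoop, pvBLoop]
  | case3 w hmult next_w rest2 hget hdig ih =>
    -- multiplier word followed by a digit string
    have hnd : next_w ≠ "double" := by rintro rfl; exact absurd hdig (by decide)
    have hnt : next_w ≠ "triple" := by rintro rfl; exact absurd hdig (by decide)
    rcases hmult with h | h <;> subst h <;>
      simp_all [pvALoop, pvBLoop]
  | case4 w hmult next_w rest2 hget hdig ih =>
    -- multiplier word followed by neither: A skips it, B's pending multiplier is never used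
    have hdig' : PySem.Str.strIsdigit next_w = false := by simpa using hdig
    have hskip := pvALoop_mult_skip w next_w rest2 hmult hget (by simpa using hdig)
    have hind := pvBLoop_mult_indep next_w rest2 2 1 hget hdig'
    have hind3 := pvBLoop_mult_indep next_w rest2 3 1 hget hdig'
    rcases hmult with h | h <;> subst h <;>
      rw [hskip, ih] <;> (conv_rhs => rw [pvBLoop]) <;> simp [hind, hind3]
  | case5 w hmult ih =>
    -- multiplier word at the end
    rcases hmult with h | h <;> subst h <;> simp [pvALoop, pvBLoop]
  | case6 w rest hmult digit hget ih =>
    have hw2 : ¬ (w = "double" ∨ w = "triple") := hmult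
    rw [not_or] at hw2
    simp [pvALoop, pvBLoop, hget, hw2.1, hw2.2, pvStrMul_one, ih]
  | case7 w rest hmult hget _cl hne ih =>
    have hw2 : ¬ (w = "double" ∨ w = "triple") := hmult
    rw [not_or] at hw2
    have hne' : pvClean w ≠ "" := hne
    by_cases hdig : PySem.Str.strIsdigit w = true
    · obtain ⟨hcl, hwne⟩ := pvClean_of_isdigit w hdig
      have hdig' : PySem.Chars.strIsdigit w.toList = true := by simpa using hdig
      simp [pvALoop, pvBLoop, hget, hw2.1, hw2.2, hdig', pvStrMul_one, hcl, hwne, ih]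
    · have hdig' : PySem.Chars.strIsdigit w.toList = false := by
        simpa using eq_false_of_ne_true hdig
      simp [pvALoop, pvBLoop, hget, hw2.1, hw2.2, hdig', ih, hne']
  | case8 w rest hmult hget _cl hne ih =>
    have hw2 : ¬ (w = "double" ∨ w = "triple") := hmult
    rw [not_or] at hw2
    have hne' : pvClean w = "" := by simpa using hne
    have hdig : PySem.Str.strIsdigit w = false := by
      by_contra hc
      have hc' : PySem.Str.strIsdigit w = true := by simpa using hc
      obtain ⟨hcl, hwne⟩ := pvClean_of_isdigit w hc'
      exact hwne (hcl ▸ hne')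
    have hdig' : PySem.Chars.strIsdigit w.toList = false := by simpa using hdig
    simp [pvALoop, pvBLoop, hget, hw2.1, hw2.2, hdig', ih, hne']

-- ===== VERDICT (by name: the statement is the Claim_ definition above) =====
theorem parse_spoken_numerals_spec : Claim_equal_parse_spoken_numerals := by
  intro text _
  unfold Spec_parse_spoken_numerals parse_spoken_numerals parse_spoken_numerals_alt
  cases text with
  | none => rfl
  | some t =>
    by_cases h : t = "" <;> simp [h, pvLoop_eq]
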